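-- pv_equiv track=rewrite | github.com/Ming-Ni-Group/P.aeruginosa-ICU-patients | scripts/analysis/iSNV_calling/iSNVpy_iSNVtable_SampGnmUsingSNP.py | subSNPGnm
-- ===== SOURCE A (Python) =====
-- def subSNPGnm(sample,samp_FreqDic,NADic,refID,RefGnm,AlleDic):
-- 	RefChromID = refID.split(">")[1]
--
-- 	Gnm = ''
-- 	Ncount = 0
-- 	for CiteIndex in range(0,len(RefGnm)):
-- 		Cite = CiteIndex + 1
-- 		if Cite in samp_FreqDic:
-- 			Base = AlleDic[Cite]
-- 		elif Cite in NADic: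
-- 			Base = "N"
-- 			Ncount += 1
-- 		else:
-- 			Base = RefGnm[CiteIndex]
--
-- 		Gnm += Base
-- 	return Gnm,Ncount
-- ===== SOURCE B (Python) =====
-- def subSNPGnm(sample, samp_FreqDic, NADic, refID, RefGnm, AlleDic):
--     n = len(RefGnm)
--     Gnm = list(RefGnm)
--     for Cite in samp_FreqDic:
--         if 1 <= Cite <= n:
--             Gnm[Cite - 1] = AlleDic[Cite]
--     Ncount = 0
--     for Cite in NADic:
--         if 1 <= Cite <= n and Cite not in samp_FreqDic:
--             Gnm[Cite - 1] = "N"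
--             Ncount += 1
--     return ''.join(Gnm), Ncount
-- ===== Notes on version B (the rewrite author's own statement) =====
-- stated objective: faster
-- what changed: Instead of scanning every reference position and testing dict membership per position, B copies the reference into a mutable list once and patches only the sparse SNP/NA positions by iterating the dicts' keys.
import Mathlib
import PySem

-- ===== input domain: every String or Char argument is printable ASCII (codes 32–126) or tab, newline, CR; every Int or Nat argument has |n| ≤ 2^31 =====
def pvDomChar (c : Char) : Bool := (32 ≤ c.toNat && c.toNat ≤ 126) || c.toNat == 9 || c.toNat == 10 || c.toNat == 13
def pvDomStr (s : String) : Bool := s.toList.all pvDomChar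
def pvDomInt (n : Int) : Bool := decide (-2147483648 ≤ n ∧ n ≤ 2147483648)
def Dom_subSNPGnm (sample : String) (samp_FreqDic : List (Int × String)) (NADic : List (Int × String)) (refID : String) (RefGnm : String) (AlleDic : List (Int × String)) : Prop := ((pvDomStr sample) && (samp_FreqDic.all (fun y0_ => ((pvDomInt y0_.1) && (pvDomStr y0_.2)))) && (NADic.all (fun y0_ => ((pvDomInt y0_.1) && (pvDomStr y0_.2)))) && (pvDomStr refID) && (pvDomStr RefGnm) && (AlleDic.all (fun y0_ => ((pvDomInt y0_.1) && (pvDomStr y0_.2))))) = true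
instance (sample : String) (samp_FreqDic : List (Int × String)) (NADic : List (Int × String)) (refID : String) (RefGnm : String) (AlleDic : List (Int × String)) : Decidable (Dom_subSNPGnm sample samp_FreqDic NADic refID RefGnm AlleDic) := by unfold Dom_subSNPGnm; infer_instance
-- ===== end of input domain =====

-- B patches a mutable copy of the reference at the sparse SNP/NA key positions instead of
-- rebuilding the genome position by position with a dict test at every position.
-- Dicts are association lists (lookup = first match; key iteration visits the distinct keys in order).

-- first-match dict lookup d[k], as a character list (total form; Pre_ guards the KeyError case)
def pvLookup (d : List (Int × String)) (k : Int) : List Char := ((List.lookup k d).getD "").toList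

-- ===== PORT A =====
-- 'RefChromID = refID.split(">")[1]' raises IndexError when '>' ∉ refID (excluded by Pre_);
-- its value is never used, so the port does not bind it.
def subSNPGnm (sample : String) (samp_FreqDic : List (Int × String)) (NADic : List (Int × String)) (refID : String) (RefGnm : String) (AlleDic : List (Int × String)) : String × Int :=
  let res := (PySem.List.pyRange 0 (PySem.Str.len RefGnm) 1).foldl
    (fun (acc : List Char × Int) citeIndex =>
      let cite := citeIndex + 1
      if cite ∈ samp_FreqDic.map Prod.fst then
        (acc.1 ++ pvLookup AlleDic cite, acc.2)
      else if cite ∈ NADic.map Prod.fst then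
        (acc.1 ++ ['N'], acc.2 + 1)
      else
        (acc.1 ++ [PySem.List.pyGetD RefGnm.toList citeIndex ' '], acc.2))
    ([], 0)
  (String.ofList res.1, res.2)

-- ===== PORT B =====
def subSNPGnm_alt (sample : String) (samp_FreqDic : List (Int × String)) (NADic : List (Int × String)) (refID : String) (RefGnm : String) (AlleDic : List (Int × String)) : String × Int :=
  let n : Int := PySem.Str.len RefGnm
  let gnm0 : List (List Char) := RefGnm.toList.map (fun c => [c])
  let g1 := (PySem.List.dedup (samp_FreqDic.map Prod.fst)).foldl
    (fun g k => if 1 ≤ k ∧ k ≤ n then g.set (k - 1).toNat (pvLookup AlleDic k) else g) gnm0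
  let res := (PySem.List.dedup (NADic.map Prod.fst)).foldl
    (fun (p : List (List Char) × Int) k =>
      if (1 ≤ k ∧ k ≤ n) ∧ k ∉ samp_FreqDic.map Prod.fst then
        (p.1.set (k - 1).toNat ['N'], p.2 + 1)
      else p)
    (g1, 0)
  (String.ofList res.1.flatten, res.2)

-- ===== PRECONDITION & SPEC =====
-- Pre_ excludes exactly the inputs where A raises: IndexError when refID contains no '>',
-- and KeyError when some in-range samp_FreqDic key has no AlleDic allele.
def Pre_subSNPGnm (sample : String) (samp_FreqDic : List (Int × String)) (NADic : List (Int × String)) (refID : String) (RefGnm : String) (AlleDic : List (Int × String)) : Prop :=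
  '>' ∈ refID.toList ∧
  ∀ k ∈ samp_FreqDic.map Prod.fst, (1 ≤ k ∧ k ≤ PySem.Str.len RefGnm) → k ∈ AlleDic.map Prod.fst
instance (sample : String) (samp_FreqDic : List (Int × String)) (NADic : List (Int × String)) (refID : String) (RefGnm : String) (AlleDic : List (Int × String)) : Decidable (Pre_subSNPGnm sample samp_FreqDic NADic refID RefGnm AlleDic) := by unfold Pre_subSNPGnm; infer_instance

def pvWitness_subSNPGnm : String × (List (Int × String)) × (List (Int × String)) × String × String × (List (Int × String)) :=
  ("s1", [(1, "0.9")], [(2, "na")], ">chr1", "GTC", [(1, "A")])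

def Spec_subSNPGnm (sample : String) (samp_FreqDic : List (Int × String)) (NADic : List (Int × String)) (refID : String) (RefGnm : String) (AlleDic : List (Int × String)) (out : String × Int) : Prop := out = subSNPGnm_alt sample samp_FreqDic NADic refID RefGnm AlleDic
instance (sample : String) (samp_FreqDic : List (Int × String)) (NADic : List (Int × String)) (refID : String) (RefGnm : String) (AlleDic : List (Int × String)) (out : String × Int) : Decidable (Spec_subSNPGnm sample samp_FreqDic NADic refID RefGnm AlleDic out) := by unfold Spec_subSNPGnm; infer_instance

-- ===== CLAIM (what is proved, stated in full; the proofs are below) =====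
def Claim_equal_subSNPGnm : Prop := ∀ (sample : String) (samp_FreqDic : List (Int × String)) (NADic : List (Int × String)) (refID : String) (RefGnm : String) (AlleDic : List (Int × String)), Dom_subSNPGnm sample samp_FreqDic NADic refID RefGnm AlleDic → Pre_subSNPGnm sample samp_FreqDic NADic refID RefGnm AlleDic → Spec_subSNPGnm sample samp_FreqDic NADic refID RefGnm AlleDic (subSNPGnm sample samp_FreqDic NADic refID RefGnm AlleDic)
-- ===== LEMMAS AND PROOFS =====

def pvBase (samp NA Alle : List (Int × String)) (R : List Char) (c : Int) : List Char :=
  if c ∈ samp.map Prod.fst then pvLookup Alle c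
  else if c ∈ NA.map Prod.fst then ['N']
  else [PySem.List.pyGetD R (c - 1) ' ']

lemma pv_A_fold (samp NA Alle : List (Int × String)) (R : List Char) :
 ∀ (l : List Int) (g : List Char) (c : Int),
  l.foldl (fun (acc : List Char × Int) citeIndex =>
      let cite := citeIndex + 1
      if cite ∈ samp.map Prod.fst then (acc.1 ++ pvLookup Alle cite, acc.2)
      else if cite ∈ NA.map Prod.fst then (acc.1 ++ ['N'], acc.2 + 1)
      else (acc.1 ++ [PySem.List.pyGetD R citeIndex ' '], acc.2)) (g, c)
  = (g ++ (l.map (fun i => pvBase samp NA Alle R (i + 1))).flatten,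
     c + (l.countP (fun i => decide ((i + 1) ∉ samp.map Prod.fst ∧ (i + 1) ∈ NA.map Prod.fst)) : Int)) := by
  intro l
  induction l with
  | nil => simp
  | cons x xs ih =>
    intro g c
    simp only [List.foldl_cons, List.map_cons, List.flatten_cons, List.countP_cons]
    by_cases hs : (x + 1) ∈ samp.map Prod.fst
    · simp [hs, ih, pvBase, List.append_assoc]
    · by_cases hn : (x + 1) ∈ NA.map Prod.fst
      · simp [hs, hn, ih, pvBase, List.append_assoc]
        ring
      · simp [hs, hn, ih, pvBase, List.append_assoc, add_sub_cancel_right]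

lemma pv_fold_set_length {α : Type} (C : Int → Prop) [DecidablePred C] (v : Int → α) :
 ∀ (ks : List Int) (g : List α),
  (ks.foldl (fun g k => if C k then g.set (k - 1).toNat (v k) else g) g).length = g.length := by
  intro ks
  induction ks with
  | nil => simp
  | cons x xs ih =>
    intro g
    simp only [List.foldl_cons]
    by_cases h : C x
    · rw [if_pos h, ih]; simp
    · rw [if_neg h, ih]

lemma pv_fold_set_get {α : Type} (C : Int → Prop) [DecidablePred C] (v : Int → α)
    (hC : ∀ k, C k → 1 ≤ k) :
 ∀ (ks : List Int) (g : List α) (i : Nat), i < g.length →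
  (ks.foldl (fun g k => if C k then g.set (k - 1).toNat (v k) else g) g)[i]? =
  if ((i : Int) + 1) ∈ ks ∧ C ((i : Int) + 1) then some (v ((i : Int) + 1)) else g[i]? := by
  intro ks
  induction ks with
  | nil => simp
  | cons x xs ih =>
    intro g i hi
    simp only [List.foldl_cons]
    by_cases hx : C x
    · rw [if_pos hx, ih _ i (by simpa using hi)]
      by_cases hmem : ((i : Int) + 1) ∈ xs ∧ C ((i : Int) + 1)
      · rw [if_pos hmem, if_pos ⟨List.mem_cons_of_mem _ hmem.1, hmem.2⟩]
      · rw [if_neg hmem]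
        by_cases hxi : (x - 1).toNat = i
        · have hx1 : 1 ≤ x := hC x hx
          have hxe : x = (i : Int) + 1 := by omega
          rw [hxi, List.getElem?_set_self hi]
          rw [if_pos ⟨by rw [← hxe]; exact List.mem_cons_self, by rw [← hxe]; exact hx⟩, hxe]
        · rw [List.getElem?_set_ne hxi]
          by_cases hxe : ((i : Int) + 1) = x
          · exfalso
            have hx1 : 1 ≤ x := hC x hx
            omega
          · rw [if_neg (by
              rintro ⟨hm, hc⟩
              rcases List.mem_cons.mp hm with h | h
              · exact hxe h
              · exact hmem ⟨h, hc⟩)]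
    · rw [if_neg hx, ih _ i hi]
      congr 1
      · simp only [eq_iff_iff]
        constructor
        · rintro ⟨hm, hc⟩; exact ⟨List.mem_cons_of_mem _ hm, hc⟩
        · rintro ⟨hm, hc⟩
          rcases List.mem_cons.mp hm with h | h
          · exact absurd (h ▸ hc) hx
          · exact ⟨h, hc⟩

lemma pv_fold_pair {α : Type} (C : Int → Prop) [DecidablePred C] (v : Int → α) :
 ∀ (ks : List Int) (g : List α) (c : Int),
  ks.foldl (fun (p : List α × Int) k => if C k then (p.1.set (k - 1).toNat (v k), p.2 + 1) else p) (g, c)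
  = (ks.foldl (fun g k => if C k then g.set (k - 1).toNat (v k) else g) g,
     c + (ks.countP (fun k => decide (C k)) : Int)) := by
  intro ks
  induction ks with
  | nil => simp
  | cons x xs ih =>
    intro g c
    simp only [List.foldl_cons]
    by_cases h : C x
    · rw [if_pos h, ih, List.countP_cons]
      simp [h]
      ring
    · rw [if_neg h, ih, List.countP_cons]
      simp [h]

lemma pv_count_eq (samp NA : List (Int × String)) (N : Nat) :
  ((List.range N).countP (fun (i : Nat) => decide (((i : Int) + 1) ∉ samp.map Prod.fst ∧ ((i : Int) + 1) ∈ NA.map Prod.fst)))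
  = ((PySem.List.dedup (NA.map Prod.fst)).countP (fun k => decide ((1 ≤ k ∧ k ≤ (N : Int)) ∧ k ∉ samp.map Prod.fst))) := by
  rw [List.countP_eq_length_filter, List.countP_eq_length_filter]
  rw [← List.toFinset_card_of_nodup ((List.nodup_range).filter _),
      ← List.toFinset_card_of_nodup ((PySem.List.nodup_dedup _).filter _)]
  apply Finset.card_bij' (fun (i : Nat) (_ : i ∈ _) => (i : Int) + 1) (fun (k : Int) (_ : k ∈ _) => (k - 1).toNat)
  · intro i hi
    simp only [List.mem_toFinset, List.mem_filter, List.mem_range, decide_eq_true_eq] at hi ⊢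
    refine ⟨?_, ?_⟩
    · rw [PySem.List.mem_dedup]; exact hi.2.2
    · exact ⟨⟨by omega, by omega⟩, hi.2.1⟩
  · intro k hk
    simp only [List.mem_toFinset, List.mem_filter, List.mem_range, decide_eq_true_eq] at hk ⊢
    obtain ⟨hmem, ⟨h1, h2⟩, h3⟩ := hk
    have hcast : (((k - 1).toNat : Int)) + 1 = k := by omega
    refine ⟨by omega, ?_, ?_⟩
    · rw [hcast]; exact h3
    · rw [hcast]; rwa [PySem.List.mem_dedup] at hmem
  · intro i _; omega
  · intro k hk
    simp only [List.mem_toFinset, List.mem_filter, decide_eq_true_eq] at hk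
    omega

theorem pv_main (sample : String) (samp NA : List (Int × String)) (refID RefGnm : String) (Alle : List (Int × String)) :
    subSNPGnm sample samp NA refID RefGnm Alle = subSNPGnm_alt sample samp NA refID RefGnm Alle := by
  unfold subSNPGnm subSNPGnm_alt
  dsimp only
  set R := RefGnm.toList with hR
  set N := R.length with hN
  have hlen : PySem.Str.len RefGnm = (N : Int) := by rw [PySem.Str.len_eq]
  rw [pv_A_fold, hlen, PySem.List.pyRange_one]
  rw [pv_fold_pair (C := fun k => (1 ≤ k ∧ k ≤ (N : Int)) ∧ k ∉ samp.map Prod.fst) (v := fun _ => ['N'])]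
  have hg0len : (R.map (fun c => [c])).length = N := by rw [List.length_map, hN]
  set g1 := (PySem.List.dedup (samp.map Prod.fst)).foldl
      (fun g k => if 1 ≤ k ∧ k ≤ (N : Int) then g.set (k - 1).toNat (pvLookup Alle k) else g)
      (R.map (fun c => [c])) with hg1
  set g2 := (PySem.List.dedup (NA.map Prod.fst)).foldl
      (fun g k => if (1 ≤ k ∧ k ≤ (N : Int)) ∧ k ∉ samp.map Prod.fst then g.set (k - 1).toNat ['N'] else g) g1 with hg2
  have hg1len : g1.length = N := by
    rw [hg1, pv_fold_set_length (C := fun k => 1 ≤ k ∧ k ≤ (N : Int)) (v := pvLookup Alle)]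
    exact hg0len
  have hg2len : g2.length = N := by
    rw [hg2, pv_fold_set_length (C := fun k => (1 ≤ k ∧ k ≤ (N : Int)) ∧ k ∉ samp.map Prod.fst) (v := fun _ => ['N'])]
    exact hg1len
  have hget : ∀ (i : Nat), i < N → g2[i]? = some (pvBase samp NA Alle R ((i : Int) + 1)) := by
    intro i hi
    rw [hg2, pv_fold_set_get (C := fun k => (1 ≤ k ∧ k ≤ (N : Int)) ∧ k ∉ samp.map Prod.fst)
          (v := fun _ => ['N']) (fun k hk => hk.1.1) _ _ i (by rw [hg1len]; exact hi)]
    rw [hg1, pv_fold_set_get (C := fun k => 1 ≤ k ∧ k ≤ (N : Int)) (v := pvLookup Alle)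
          (fun k hk => hk.1) _ _ i (by rw [hg0len]; exact hi)]
    have hRbase : (R.map (fun c => [c]))[i]? = some [R[i]'hi] := by
      rw [List.getElem?_map, List.getElem?_eq_getElem hi]
      rfl
    by_cases hs : ((i : Int) + 1) ∈ samp.map Prod.fst
    · rw [if_neg (by rintro ⟨_, _, hno⟩; exact hno hs),
          if_pos ⟨(PySem.List.mem_dedup _ _).mpr hs, by omega, by omega⟩]
      rw [pvBase, if_pos hs]
    · by_cases hn : ((i : Int) + 1) ∈ NA.map Prod.fst
      · rw [if_pos ⟨(PySem.List.mem_dedup _ _).mpr hn, ⟨by omega, by omega⟩, hs⟩]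
        rw [pvBase, if_neg hs, if_pos hn]
      · rw [if_neg (by rintro ⟨hm, _⟩; exact hn ((PySem.List.mem_dedup _ _).mp hm)),
            if_neg (by rintro ⟨hm, _⟩; exact hs ((PySem.List.mem_dedup _ _).mp hm)),
            hRbase]
        rw [pvBase, if_neg hs, if_neg hn]
        have : (i : Int) + 1 - 1 = (i : Int) := by ring
        rw [this, PySem.List.pyGetD_natCast, List.getD_eq_getElem?_getD, List.getElem?_eq_getElem hi]
        rfl
  have hlist : g2 = (List.range N).map (fun (k : Nat) => pvBase samp NA Alle R ((k : Int) + 1)) := by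
    apply List.ext_getElem?
    intro i
    by_cases hi : i < N
    · rw [hget i hi, List.getElem?_map, List.getElem?_range hi]; rfl
    · rw [List.getElem?_eq_none (by omega : g2.length ≤ i),
          List.getElem?_eq_none (by simp; omega)]
  have hcnt : ((List.map (fun (k : Nat) => (0 : Int) + (k : Int)) (List.range (((N : Int) - 0).toNat))).countP
        (fun i => decide ((i + 1) ∉ samp.map Prod.fst ∧ (i + 1) ∈ NA.map Prod.fst)))
      = ((PySem.List.dedup (NA.map Prod.fst)).countP
          (fun k => decide ((1 ≤ k ∧ k ≤ (N : Int)) ∧ k ∉ samp.map Prod.fst))) := by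
    rw [List.countP_map]
    have : (((N : Int) - 0).toNat) = N := by omega
    rw [this, ← pv_count_eq samp NA N]
    apply List.countP_congr
    intro i _
    simp
  refine Prod.ext ?_ ?_
  · dsimp only
    simp only [List.nil_append]
    rw [hlist]
    have hNN : (((N : Int) - 0)).toNat = N := by omega
    rw [hNN, List.map_map]
    congr 1
    congr 1
    apply List.map_congr_left
    intro k _
    simp [Function.comp]
  · dsimp only
    congr 1
    exact_mod_cast hcnt

-- ===== VERDICT (by name: the statement is the Claim_ definition above) =====
theorem subSNPGnm_spec : Claim_equal_subSNPGnm := by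
  intro sample samp_FreqDic NADic refID RefGnm AlleDic _ _
  exact pv_main sample samp_FreqDic NADic refID RefGnm AlleDic
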